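-- pv_equiv track=rewrite | github.com/riteme/riteme.github.io | css_html_js_minify/minify.py | _prioritify
-- ===== SOURCE A (Python) =====
-- def _prioritify(line_of_css, css_props_text_as_list):
--     """Return args priority, priority is integer and smaller means higher."""
--     sorted_css_properties, groups_by_alphabetic_order = css_props_text_as_list
--     priority_integer, group_integer = 9999, 0
--     for css_property in sorted_css_properties:
--         if css_property.lower() == line_of_css.split(":")[0].lower().strip():
--             priority_integer = sorted_css_properties.index(css_property)
--             group_integer = groups_by_alphabetic_order[priority_integer]
--             break
--     return priority_integer, group_integer
-- ===== SOURCE B (Python) =====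
-- def _prioritify(line_of_css, css_props_text_as_list):
--     """Return args priority, priority is integer and smaller means higher."""
--     sorted_css_properties, groups_by_alphabetic_order = css_props_text_as_list
--     key = line_of_css.split(":")[0].lower().strip()
--     matches = [index for index, prop in enumerate(sorted_css_properties)
--                if prop.lower() == key]
--     if not matches:
--         return 9999, 0
--     priority = min(matches)
--     return priority, groups_by_alphabetic_order[priority]
-- ===== Notes on version B (the rewrite author's own statement) =====
-- stated objective: faster
-- what changed: Instead of A's scan-with-break plus a list.index rescan (recomputing the split/lower/strip key per element), B computes the key once, collects ALL matching indices in one enumerate-filter pass, and returns the minimum of them (none -> (9999,0)).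
-- outside the precondition, e.g. on _prioritify('a:1', (['a'], [])): A raises IndexError, B raises IndexError
import Mathlib
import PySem

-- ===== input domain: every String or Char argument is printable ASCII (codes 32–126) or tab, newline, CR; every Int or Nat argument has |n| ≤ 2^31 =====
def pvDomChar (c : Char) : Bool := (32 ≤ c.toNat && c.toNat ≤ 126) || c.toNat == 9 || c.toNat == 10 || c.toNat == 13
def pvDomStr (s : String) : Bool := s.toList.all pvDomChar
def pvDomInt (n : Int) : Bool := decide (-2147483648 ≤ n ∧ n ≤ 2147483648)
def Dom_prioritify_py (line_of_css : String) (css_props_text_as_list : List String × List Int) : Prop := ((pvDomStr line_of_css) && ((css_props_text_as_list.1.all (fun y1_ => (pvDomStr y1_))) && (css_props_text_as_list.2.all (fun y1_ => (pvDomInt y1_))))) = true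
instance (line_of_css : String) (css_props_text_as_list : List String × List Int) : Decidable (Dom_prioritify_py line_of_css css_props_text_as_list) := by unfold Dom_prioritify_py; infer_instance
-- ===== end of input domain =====

-- B computes the key once, collects all matching indices in one pass and takes their minimum,
-- instead of A's scan-with-break plus list.index rescan (alternative; return-value equivalence).

-- `line_of_css.split(":")[0].lower().strip()` (the pure key expression both Pythons evaluate)
def pvKey (line_of_css : String) : String :=
  PySem.Str.strip (PySem.Str.lower ((PySem.List.pyGet? ((PySem.Str.split? line_of_css ":").getD []) 0).getD ""))

-- ===== PORT A =====
-- the for-loop with break; on a match: priority = sorted_css_properties.index(css_property),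
-- group = groups[priority] (a Python IndexError there is the `.getD 0`; excluded by Pre_)
def pvALoop (line_of_css : String) (orig : List String) (groups : List Int) : List String → Int × Int
  | [] => (9999, 0)
  | css_property :: rest =>
    if PySem.Str.lower css_property == pvKey line_of_css then
      let priority_integer : Int := (((PySem.List.index? orig css_property).getD 0 : Nat) : Int)
      (priority_integer, (PySem.List.pyGet? groups priority_integer).getD 0)
    else pvALoop line_of_css orig groups rest

def prioritify_py (line_of_css : String) (css_props_text_as_list : List String × List Int) : Int × Int :=
  pvALoop line_of_css css_props_text_as_list.1 css_props_text_as_list.2 css_props_text_as_list.1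

-- ===== PORT B =====
-- `matches = [index for index, prop in enumerate(props) if prop.lower() == key]`;
-- empty -> (9999, 0); else `priority = min(matches); (priority, groups[priority])`
-- (a Python IndexError at groups[priority] is the `.getD 0`; excluded by Pre_)
def prioritify_py_alt (line_of_css : String) (css_props_text_as_list : List String × List Int) : Int × Int :=
  let key := pvKey line_of_css
  let pvMatches := ((PySem.List.enumerate css_props_text_as_list.1).filter
      (fun ip => PySem.Str.lower ip.2 == key)).map (fun ip => ip.1)
  match PySem.List.min? pvMatches (fun x => x) with
  | none => (9999, 0)
  | some priority => (priority, (PySem.List.pyGet? css_props_text_as_list.2 priority).getD 0)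

-- ===== PRECONDITION & SPEC =====
-- Pre_ excludes exactly the inputs where the matched property's index is out of range for the
-- groups list: there Python A raises IndexError (and Python B raises it too).
def Pre_prioritify_py (line_of_css : String) (css_props_text_as_list : List String × List Int) : Prop :=
  ((List.findIdx? (fun p => PySem.Str.lower p == pvKey line_of_css) css_props_text_as_list.1).all
    (fun j => decide (j < css_props_text_as_list.2.length))) = true
instance (line_of_css : String) (css_props_text_as_list : List String × List Int) : Decidable (Pre_prioritify_py line_of_css css_props_text_as_list) := by unfold Pre_prioritify_py; infer_instance

def pvWitness_prioritify_py : String × (List String × List Int) := ("Color: red", (["color", "width"], [3, 4]))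

def Spec_prioritify_py (line_of_css : String) (css_props_text_as_list : List String × List Int) (out : Int × Int) : Prop := out = prioritify_py_alt line_of_css css_props_text_as_list
instance (line_of_css : String) (css_props_text_as_list : List String × List Int) (out : Int × Int) : Decidable (Spec_prioritify_py line_of_css css_props_text_as_list out) := by unfold Spec_prioritify_py; infer_instance

-- ===== CLAIM (what is proved, stated in full; the proofs are below) =====
def Claim_equal_prioritify_py : Prop := ∀ (line_of_css : String) (css_props_text_as_list : List String × List Int), Dom_prioritify_py line_of_css css_props_text_as_list → Pre_prioritify_py line_of_css css_props_text_as_list → Spec_prioritify_py line_of_css css_props_text_as_list (prioritify_py line_of_css css_props_text_as_list)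

-- ===== LEMMAS AND PROOFS =====

theorem pv_index_first {pre rest : List String} {p : String} (hp : p ∉ pre) :
    PySem.List.index? (pre ++ p :: rest) p = some pre.length :=
  (PySem.List.index?_eq_some_iff (pre ++ p :: rest) p pre.length).mpr ⟨pre, rest, rfl, rfl, hp⟩

-- A's loop computes the first match: characterised by findIdx?
theorem pvALoop_eq (line : String) (groups : List Int) :
    ∀ (post pre : List String),
      (∀ q ∈ pre, ¬ (PySem.Str.lower q == pvKey line) = true) →
      pvALoop line (pre ++ post) groups post =
        match List.findIdx? (fun p => PySem.Str.lower p == pvKey line) post with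
        | none => (9999, 0)
        | some j => (((pre.length + j : Nat) : Int),
            (PySem.List.pyGet? groups ((pre.length + j : Nat) : Int)).getD 0) := by
  intro post
  induction post with
  | nil => intro pre _; simp [pvALoop]
  | cons p rest ih =>
    intro pre hpre
    by_cases hm : (PySem.Str.lower p == pvKey line) = true
    · have hp : p ∉ pre := fun hmem => hpre p hmem hm
      have hidx := pv_index_first (rest := rest) hp
      simp only [pvALoop, hm, if_true, List.findIdx?_cons, hidx, Option.getD_some]
      simp
    · simp only [pvALoop]
      rw [if_neg hm]
      have h2 : ∀ q ∈ pre ++ [p], ¬ (PySem.Str.lower q == pvKey line) = true := by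
        intro q hq
        rcases List.mem_append.mp hq with h | h
        · exact hpre q h
        · simp at h; subst h; exact hm
      have hrw : pre ++ p :: rest = (pre ++ [p]) ++ rest := by simp
      rw [hrw, ih (pre ++ [p]) h2, List.findIdx?_cons, if_neg hm]
      cases hf : List.findIdx? (fun q => PySem.Str.lower q == pvKey line) rest with
      | none => simp
      | some j =>
        simp only [Option.map_some]
        have hlen : pre.length + (j + 1) = (pre ++ [p]).length + j := by
          simp; omega
        rw [hlen]

theorem pv_foldl_min_of_le {a : Int} : ∀ (t : List Int), (∀ y ∈ t, a ≤ y) → t.foldl min a = a := by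
  intro t
  induction t with
  | nil => intro _; rfl
  | cons y rest ih =>
    intro h
    have hy : a ≤ y := h y (by simp)
    have : min a y = a := min_eq_left hy
    simp only [List.foldl_cons, this]
    exact ih (fun z hz => h z (by simp [hz]))

-- B's min-of-all-matches equals the first match: characterised by the same findIdx?
theorem pv_min_matches (key : String) :
    ∀ (props : List String) (s : Int),
      PySem.List.min? (((PySem.List.enumerate props s).filter
          (fun ip => PySem.Str.lower ip.2 == key)).map (fun ip => ip.1)) (fun x => x) =
        (List.findIdx? (fun p => PySem.Str.lower p == key) props).map (fun j => s + (j : Int)) := by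
  intro props
  induction props with
  | nil => intro s; simp [PySem.List.enumerate_nil, PySem.List.min?]
  | cons p rest ih =>
    intro s
    rw [PySem.List.enumerate_cons, List.findIdx?_cons]
    by_cases hm : (PySem.Str.lower p == key) = true
    · simp only [List.filter_cons, hm, if_true, List.map_cons, PySem.List.min?_id_cons]
      have hge : ∀ y ∈ ((PySem.List.enumerate rest (s + 1)).filter
          (fun ip => PySem.Str.lower ip.2 == key)).map (fun ip => ip.1), s ≤ y := by
        intro y hy
        rcases List.mem_map.mp hy with ⟨ip, hip, hy⟩
        have hmem := List.mem_of_mem_filter hip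
        rcases (PySem.List.mem_enumerate_iff _ _ _).mp hmem with ⟨k, hk, hip2⟩
        subst hy; rw [hip2]; simp; omega
      rw [pv_foldl_min_of_le _ hge]
      simp
    · rw [List.filter_cons_of_neg (by simpa using hm), ih (s + 1), if_neg hm]
      cases hf : List.findIdx? (fun q => PySem.Str.lower q == key) rest with
      | none => simp
      | some j => simp; omega

-- ===== VERDICT (by name: the statement is the Claim_ definition above) =====
theorem prioritify_py_spec : Claim_equal_prioritify_py := by
  intro line css _ _
  unfold Spec_prioritify_py prioritify_py prioritify_py_alt
  have hA := pvALoop_eq line css.2 css.1 [] (by simp)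
  simp only [List.nil_append] at hA
  rw [hA]
  simp only [pv_min_matches (pvKey line) css.1 0]
  cases hf : List.findIdx? (fun p => PySem.Str.lower p == pvKey line) css.1 with
  | none => simp
  | some j => simp
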